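-- pv_equiv track=rewrite | github.com/LeeJuhae/Algorithm_study | monthly/2/4.py | get_beauty
-- ===== SOURCE A (Python) =====
-- def get_beauty(s):
-- 	if s.count(s[0]) == len(s):
-- 		return 0
-- 	start, end = 0, len(s)-1
-- 	while start < end:
-- 		if s[start] == s[end]:
-- 			end -= 1
-- 		else:
-- 			break
-- 	return end - start
-- ===== SOURCE B (Python) =====
-- def get_beauty(s):
--     c0 = s[0]
--     return max((i for i in range(len(s)) if s[i] != c0), default=0)
-- ===== Notes on version B (the rewrite author's own statement) =====
-- stated objective: simpler
-- what changed: Replaces A's up-front count-all guard plus backward early-break scan with a single forward pass returning the largest differing index (default 0), one line instead of a guard and a while loop.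
import Mathlib
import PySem

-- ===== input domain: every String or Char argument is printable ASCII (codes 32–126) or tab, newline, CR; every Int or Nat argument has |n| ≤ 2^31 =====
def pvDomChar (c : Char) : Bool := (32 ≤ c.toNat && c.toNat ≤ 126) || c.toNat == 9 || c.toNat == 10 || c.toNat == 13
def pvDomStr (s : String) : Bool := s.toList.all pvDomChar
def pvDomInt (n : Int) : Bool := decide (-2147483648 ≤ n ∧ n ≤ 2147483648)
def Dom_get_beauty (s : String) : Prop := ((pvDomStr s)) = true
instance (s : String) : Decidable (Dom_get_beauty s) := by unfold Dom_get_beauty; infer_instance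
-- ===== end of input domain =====

-- B replaces A's count-all guard and backward early-break scan with one forward pass
-- taking the max differing index (default 0); same values, no speed claim.

-- ===== PORT A =====
-- A's while loop: start stays 0; 'end' decreases while s[0] == s[end]; returns end - 0.
def pvLoopA (cs : List Char) : Nat → Nat
  | 0 => 0
  | e + 1 =>
    if PySem.List.pyGet? cs (0 : Int) = PySem.List.pyGet? cs ((e + 1 : Nat) : Int) then
      pvLoopA cs e
    else e + 1

def get_beauty (s : String) : Int :=
  let cs := s.toList
  match cs with
  | [] => 0  -- s[0] raises IndexError in Python; excluded by Pre_get_beauty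
  | c0 :: _ =>
    if PySem.Chars.count cs [c0] = cs.length then 0
    else ((pvLoopA cs (cs.length - 1) : Nat) : Int)

-- ===== PORT B =====
def get_beauty_alt (s : String) : Int :=
  match s.toList with
  | [] => 0  -- s[0] raises IndexError in Python; excluded by Pre_get_beauty
  | c0 :: _ =>
    let cs := s.toList
    ((((List.range cs.length).filter (fun i => decide (cs.getD i c0 ≠ c0))).foldl Nat.max 0 : Nat) : Int)

-- ===== PRECONDITION & SPEC =====
-- Pre_ excludes only the empty string, on which A raises IndexError at s[0].
def Pre_get_beauty (s : String) : Prop := s.toList ≠ []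
instance (s : String) : Decidable (Pre_get_beauty s) := by unfold Pre_get_beauty; infer_instance
def pvWitness_get_beauty : String := "abca"

def Spec_get_beauty (s : String) (out : Int) : Prop := out = get_beauty_alt s
instance (s : String) (out : Int) : Decidable (Spec_get_beauty s out) := by unfold Spec_get_beauty; infer_instance

-- ===== CLAIM (what is proved, stated in full; the proofs are below) =====
def Claim_equal_get_beauty : Prop := ∀ (s : String), Dom_get_beauty s → Pre_get_beauty s → Spec_get_beauty s (get_beauty s)

-- ===== LEMMAS AND PROOFS =====

-- single-character substring count is the element count
lemma count_go_single (c : Char) : ∀ (l : List Char) (fuel acc : Nat), l.length ≤ fuel →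
    PySem.Chars.count.go [c] fuel l acc = acc + l.count c := by
  intro l
  induction l with
  | nil =>
    intro fuel acc _
    cases fuel with
    | zero => rw [PySem.Chars.count.go.eq_def]; simp
    | succ f => rw [PySem.Chars.count.go.eq_def]; simp
  | cons h t ih =>
    intro fuel acc hle
    cases fuel with
    | zero => exact absurd hle (by simp)
    | succ f =>
      rw [PySem.Chars.count.go.eq_def]
      dsimp only
      have hle' : t.length ≤ f := by
        have := hle; simp only [List.length_cons] at this; omega
      by_cases hc : c = h
      · rw [if_pos (by simp [List.isPrefixOf, hc])]
        simp only [List.length_cons, List.length_nil, Nat.zero_add, List.drop_succ_cons,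
          List.drop_zero]
        rw [ih f (acc + 1) hle']
        have hh : (h == c) = true := by simp [hc]
        simp [List.count_cons, hh]
        omega
      · rw [if_neg (by simp [List.isPrefixOf, hc])]
        rw [ih f acc hle']
        have hh : (h == c) = false := by simp; exact fun e => hc e.symm
        simp [List.count_cons, hh]

lemma count_single (c : Char) (l : List Char) :
    PySem.Chars.count l [c] = l.count c := by
  simpa using count_go_single c l l.length 0 le_rfl

lemma foldl_max_le (l : List Nat) (a b : Nat) (ha : a ≤ b) (h : ∀ x ∈ l, x ≤ b) :
    l.foldl Nat.max a ≤ b := by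
  induction l generalizing a with
  | nil => simpa using ha
  | cons x t ih =>
    simp only [List.foldl_cons]
    exact ih _ (Nat.max_le.mpr ⟨ha, h x (by simp)⟩) (fun y hy => h y (by simp [hy]))

-- A's backward loop computes the max differing index over 0..e
lemma loopA_eq_max (c0 : Char) (t : List Char) :
    ∀ e, e < (c0 :: t).length →
      pvLoopA (c0 :: t) e =
        ((List.range (e + 1)).filter
          (fun i => decide ((c0 :: t).getD i c0 ≠ c0))).foldl Nat.max 0 := by
  intro e
  induction e with
  | zero =>
    intro _
    have hf : (List.range 1).filter
        (fun i => decide ((c0 :: t).getD i c0 ≠ c0)) = [] := by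
      simp [List.range_one]
    rw [hf]
    rfl
  | succ e ih =>
    intro hlt
    have he : e < (c0 :: t).length := Nat.lt_of_succ_lt hlt
    have h0 : PySem.List.pyGet? (c0 :: t) (0 : Int) = some c0 := by
      simp
    have hget : PySem.List.pyGet? (c0 :: t) ((e + 1 : Nat) : Int)
        = some ((c0 :: t).getD (e + 1) c0) := by
      rw [PySem.List.pyGet?_natCast, List.getElem?_eq_getElem hlt,
        List.getD_eq_getElem _ _ hlt]
    simp only [pvLoopA]
    rw [h0, hget]
    by_cases hd : (c0 :: t).getD (e + 1) c0 = c0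
    · rw [if_pos (by rw [hd]), ih he, List.range_succ (n := e + 1), List.filter_append,
        List.foldl_append]
      have hd' : t[e]?.getD c0 = c0 := by simpa using hd
      have hf : List.filter (fun i => decide ((c0 :: t).getD i c0 ≠ c0)) [e + 1] = [] := by
        simp [hd']
      rw [hf, List.foldl_nil]
    · rw [if_neg (fun h => hd (Option.some.inj h).symm), List.range_succ (n := e + 1),
        List.filter_append, List.foldl_append]
      have hd' : ¬ t[e]?.getD c0 = c0 := by simpa using hd
      have hf : List.filter (fun i => decide ((c0 :: t).getD i c0 ≠ c0)) [e + 1] = [e + 1] := by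
        simp [hd']
      have hle : ((List.range (e + 1)).filter
          (fun i => decide ((c0 :: t).getD i c0 ≠ c0))).foldl Nat.max 0 ≤ e + 1 := by
        apply foldl_max_le _ _ _ (Nat.zero_le _)
        intro x hx
        have := List.mem_range.mp (List.mem_filter.mp hx).1
        omega
      rw [hf, List.foldl_cons, List.foldl_nil]
      exact (Nat.max_eq_right hle).symm

-- ===== VERDICT (by name: the statement is the Claim_ definition above) =====
theorem get_beauty_spec : Claim_equal_get_beauty := by
  intro s _ hpre
  unfold Spec_get_beauty get_beauty get_beauty_alt
  rcases hcs : s.toList with _ | ⟨c0, t⟩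
  · exact absurd hcs hpre
  · simp only [hcs]
    by_cases hall : PySem.Chars.count (c0 :: t) [c0] = (c0 :: t).length
    · rw [if_pos hall]
      have hcnt : (c0 :: t).count c0 = (c0 :: t).length := by
        rw [← count_single]; exact hall
      have heq : ∀ b ∈ (c0 :: t), c0 = b := List.count_eq_length.mp hcnt
      have hf : (List.range (c0 :: t).length).filter
          (fun i => decide ((c0 :: t).getD i c0 ≠ c0)) = [] := by
        apply List.filter_eq_nil_iff.mpr
        intro i hi
        have hi' := List.mem_range.mp hi
        have hge : (c0 :: t)[i]? = some c0 := by
          rw [List.getElem?_eq_getElem hi']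
          exact congrArg some (heq _ (List.getElem_mem hi')).symm
        simp [hge]
      rw [hf]
      rfl
    · rw [if_neg hall]
      have h1 : (c0 :: t).length - 1 = t.length := by simp
      rw [h1, loopA_eq_max c0 t t.length (by simp)]
      rfl
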